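-- pv_equiv track=rewrite | github.com/CARLOS-FATE/Visi-n_Computacional_Entrenamiento | contruction_Monitoring/monitor.py | validar_epp
-- ===== SOURCE A (Python) =====
-- def validar_epp(detecciones):
--     """
--     Verifica por ID si usa los 3 EPP: casco, chaleco y zapatos.
--     """
--     estado_por_id = {}
--
--     for x1, y1, x2, y2, obj_id, label in detecciones:
--         if obj_id not in estado_por_id:
--             estado_por_id[obj_id] = set()
--         estado_por_id[obj_id].add(label)
--
--     cumplimiento = {
--     obj_id: 'Cumple' if all(epp in items for epp in ['casco', 'chaleco', 'zapatos_de_seguridad'])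
--     else 'No Cumple'
--     for obj_id, items in estado_por_id.items()
--     }
--
--
--     return cumplimiento
-- ===== SOURCE B (Python) =====
-- REQUERIDOS = ('casco', 'chaleco', 'zapatos_de_seguridad')
--
--
-- def validar_epp(detecciones):
--     """
--     Verifica por ID si usa los 3 EPP: casco, chaleco y zapatos.
--     Sin indice: dedup de los IDs y luego busqueda directa en la lista cruda.
--     """
--     ids = []
--     for det in detecciones:
--         if det[4] not in ids:
--             ids.append(det[4])
--
--     return {
--         i: 'Cumple'
--            if all(any(d[4] == i and d[5] == e for d in detecciones) for e in REQUERIDOS)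
--            else 'No Cumple'
--         for i in ids
--     }
-- ===== Notes on version B (the rewrite author's own statement) =====
-- stated objective: alternative
-- what changed: B builds no index at all: it deduplicates the ID column in order, then decides each ID by re-scanning the raw detection list with an existence test per required EPP label, replacing A's dict-of-label-sets grouping with direct nested search.
import Mathlib
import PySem

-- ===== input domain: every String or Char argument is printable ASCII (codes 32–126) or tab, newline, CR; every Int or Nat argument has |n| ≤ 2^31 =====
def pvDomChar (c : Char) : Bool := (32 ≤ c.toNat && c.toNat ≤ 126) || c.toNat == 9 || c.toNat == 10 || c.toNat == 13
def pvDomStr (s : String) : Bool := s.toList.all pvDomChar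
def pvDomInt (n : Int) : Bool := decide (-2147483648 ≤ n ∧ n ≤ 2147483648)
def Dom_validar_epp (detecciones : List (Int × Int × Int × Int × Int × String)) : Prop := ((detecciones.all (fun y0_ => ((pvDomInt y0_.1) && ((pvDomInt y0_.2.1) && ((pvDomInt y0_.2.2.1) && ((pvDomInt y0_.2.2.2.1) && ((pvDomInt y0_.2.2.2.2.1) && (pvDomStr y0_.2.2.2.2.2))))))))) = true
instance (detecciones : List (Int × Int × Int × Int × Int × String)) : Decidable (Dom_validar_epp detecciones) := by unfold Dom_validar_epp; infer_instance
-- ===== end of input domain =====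

-- B builds no index: it deduplicates the ID column in order, then decides each ID by existence scans over the raw detection list (alternative algorithm, not faster).

-- ===== PORT A =====
-- loop body of A: group labels per ID in a dict of sets
def eppStepA (d : PySem.Dict Int (PySem.Set String)) (t : Int × Int × Int × Int × Int × String) :
    PySem.Dict Int (PySem.Set String) :=
  -- obj_id = t.2.2.2.2.1, label = t.2.2.2.2.2; 'if obj_id not in d: d[obj_id] = set()' then 'd[obj_id].add(label)'
  PySem.Dict.modify (if d.contains t.2.2.2.2.1 then d else d.insert t.2.2.2.2.1 PySem.Set.empty)
    t.2.2.2.2.1 PySem.Set.empty (fun s => PySem.Set.add s t.2.2.2.2.2)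

def validar_epp (detecciones : List (Int × Int × Int × Int × Int × String)) : List (Int × String) :=
  let estado_por_id := detecciones.foldl eppStepA PySem.Dict.empty
  (estado_por_id.items.map (fun p =>
    (p.1,
      if (["casco", "chaleco", "zapatos_de_seguridad"].all (fun epp => PySem.Set.contains p.2 epp))
      then "Cumple" else "No Cumple")))

-- ===== PORT B =====
-- first pass of B: ordered dedup of the ID column ('if det[4] not in ids: ids.append(det[4])')
def dedupIdStep (ids : List Int) (det : Int × Int × Int × Int × Int × String) : List Int :=
  if ids.contains det.2.2.2.2.1 then ids else ids ++ [det.2.2.2.2.1]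

def validar_epp_alt (detecciones : List (Int × Int × Int × Int × Int × String)) : List (Int × String) :=
  let ids := detecciones.foldl dedupIdStep []
  ids.map (fun i =>
    (i, if ["casco", "chaleco", "zapatos_de_seguridad"].all
          (fun e => detecciones.any (fun d => d.2.2.2.2.1 == i && d.2.2.2.2.2 == e))
        then "Cumple" else "No Cumple"))

-- ===== PRECONDITION & SPEC =====
def Spec_validar_epp (detecciones : List (Int × Int × Int × Int × Int × String)) (out : List (Int × String)) : Prop := out = validar_epp_alt detecciones
instance (detecciones : List (Int × Int × Int × Int × Int × String)) (out : List (Int × String)) : Decidable (Spec_validar_epp detecciones out) := by unfold Spec_validar_epp; infer_instance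

-- ===== CLAIM (what is proved, stated in full; the proofs are below) =====
def Claim_equal_validar_epp : Prop := ∀ (detecciones : List (Int × Int × Int × Int × Int × String)), Dom_validar_epp detecciones → Spec_validar_epp detecciones (validar_epp detecciones)

-- ===== LEMMAS AND PROOFS =====

-- Bool-level characterisation of membership in a Python set after .add
theorem set_contains_add {α : Type} [BEq α] [LawfulBEq α] (s : PySem.Set α) (x y : α) :
    PySem.Set.contains (PySem.Set.add s x) y = (PySem.Set.contains s y || y == x) := by
  rw [Bool.eq_iff_iff]
  simp [PySem.Set.mem_add]

-- keys after one A-step = one B-dedup-step on the keys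
theorem eppStepA_keys (d : PySem.Dict Int (PySem.Set String))
    (t : Int × Int × Int × Int × Int × String) :
    (eppStepA d t).keys = dedupIdStep d.keys t := by
  have hcont : d.contains t.2.2.2.2.1 = d.keys.contains t.2.2.2.2.1 := by
    rw [Bool.eq_iff_iff, PySem.Dict.contains_iff_mem_keys, List.contains_iff_mem]
  unfold eppStepA dedupIdStep PySem.Dict.modify
  by_cases h : d.contains t.2.2.2.2.1 = true
  · rw [if_pos h, PySem.Dict.keys_insert_of_contains _ _ h, if_pos (by rw [← hcont]; exact h)]
  · have h' : d.contains t.2.2.2.2.1 = false := by simpa using h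
    rw [if_neg h, PySem.Dict.keys_insert_of_contains _ _ (PySem.Dict.contains_insert_self _ _ _),
      PySem.Dict.keys_insert_of_not_contains _ _ h', if_neg (by rw [← hcont, h']; simp)]

theorem eppStepA_nodup (d : PySem.Dict Int (PySem.Set String))
    (t : Int × Int × Int × Int × Int × String) (hnd : d.keys.Nodup) :
    (eppStepA d t).keys.Nodup := by
  unfold eppStepA PySem.Dict.modify
  by_cases h : d.contains t.2.2.2.2.1 = true
  · rw [if_pos h]; exact PySem.Dict.nodup_keys_insert _ _ _ hnd
  · rw [if_neg h]
    exact PySem.Dict.nodup_keys_insert _ _ _ (PySem.Dict.nodup_keys_insert _ _ _ hnd)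

-- the per-ID label set after one A-step
theorem eppStepA_getD (d : PySem.Dict Int (PySem.Set String))
    (t : Int × Int × Int × Int × Int × String) (i : Int) :
    (eppStepA d t).getD i PySem.Set.empty =
      if i = t.2.2.2.2.1 then PySem.Set.add (d.getD t.2.2.2.2.1 PySem.Set.empty) t.2.2.2.2.2
      else d.getD i PySem.Set.empty := by
  unfold eppStepA PySem.Dict.modify
  by_cases h : d.contains t.2.2.2.2.1 = true
  · rw [if_pos h, PySem.Dict.getD_insert]
  · have h' : d.contains t.2.2.2.2.1 = false := by simpa using h
    rw [if_neg h, PySem.Dict.getD_insert, PySem.Dict.getD_insert,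
      PySem.Dict.getD_of_not_contains _ _ h']
    by_cases hi : i = t.2.2.2.2.1 <;> simp [hi, PySem.Dict.getD_insert]

-- A's folded keys are exactly B's deduplicated ID column
theorem epp_fold_keys (l : List (Int × Int × Int × Int × Int × String))
    (d : PySem.Dict Int (PySem.Set String)) :
    (l.foldl eppStepA d).keys = l.foldl dedupIdStep d.keys := by
  induction l generalizing d with
  | nil => rfl
  | cons t rest ih => simp only [List.foldl_cons, ih (eppStepA d t), eppStepA_keys]

theorem epp_fold_nodup (l : List (Int × Int × Int × Int × Int × String))
    (d : PySem.Dict Int (PySem.Set String)) (h : d.keys.Nodup) :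
    (l.foldl eppStepA d).keys.Nodup := by
  induction l generalizing d with
  | nil => exact h
  | cons t rest ih => exact ih (eppStepA d t) (eppStepA_nodup d t h)

-- the folded label set of id i contains E iff it did before or some folded detection is (i, E)
theorem epp_fold_contains (l : List (Int × Int × Int × Int × Int × String))
    (d : PySem.Dict Int (PySem.Set String)) (i : Int) (E : String) :
    PySem.Set.contains ((l.foldl eppStepA d).getD i PySem.Set.empty) E =
      (PySem.Set.contains (d.getD i PySem.Set.empty) E
        || l.any (fun t => t.2.2.2.2.1 == i && t.2.2.2.2.2 == E)) := by
  induction l generalizing d with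
  | nil => simp
  | cons t rest ih =>
    simp only [List.foldl_cons, List.any_cons, ih (eppStepA d t), eppStepA_getD]
    by_cases hi : i = t.2.2.2.2.1
    · rw [if_pos hi, hi, set_contains_add]
      by_cases hE : t.2.2.2.2.2 = E
      · simp [hE]
      · have h1 : (E == t.2.2.2.2.2) = false := by simpa using Ne.symm hE
        have h2 : (t.2.2.2.2.2 == E) = false := by simpa using hE
        simp [h1, h2]
    · have h1 : (t.2.2.2.2.1 == i) = false := by simpa using fun h => hi h.symm
      rw [if_neg hi]
      simp [h1]

-- ===== VERDICT (by name: the statement is the Claim_ definition above) =====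
theorem validar_epp_spec : Claim_equal_validar_epp := by
  intro detecciones _
  unfold Spec_validar_epp validar_epp validar_epp_alt
  dsimp only
  rw [PySem.Dict.items_eq_map_keys _ (epp_fold_nodup detecciones PySem.Dict.empty (by simp))
      PySem.Set.empty, List.map_map, epp_fold_keys]
  have hk : PySem.Dict.keys (ν := PySem.Set String) (PySem.Dict.empty) = ([] : List Int) := by simp
  rw [hk]
  apply List.map_congr_left
  intro i _
  simp only [Function.comp, List.all_cons, List.all_nil, Bool.and_true, epp_fold_contains,
    PySem.Dict.getD_empty]
  simp only [PySem.Set.empty, PySem.Set.contains, List.contains_nil, Bool.false_or]
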